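-- pv_equiv track=rewrite | github.com/ekremdegirmnci/ImageProcessing | ImageProcessing/code/Main.py | sort_rows_border
-- ===== SOURCE A (Python) =====
-- def sort_rows_border(img_matrix):
--     new_matrix = [[] for i in range(len(img_matrix))]
--     for i in range(len(img_matrix)):
--         sorted_list = []
--         for j in range(len(img_matrix[0])):
--             if not img_matrix[i][j] == 0:
--                 sorted_list.append(img_matrix[i][j])
--             elif img_matrix[i][j] == 0:
--                 sorted_list = sorted(sorted_list)
--                 sorted_list.append(0)
--                 new_matrix[i] += sorted_list
--                 sorted_list = []
--         if sorted_list: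
--             sorted_list = sorted(sorted_list)
--             new_matrix[i] += sorted_list
--     img_matrix = new_matrix
--     return img_matrix
-- ===== SOURCE B (Python) =====
-- def sort_rows_border(img_matrix):
--     if not img_matrix:
--         return []
--     width = len(img_matrix[0])
--     result = []
--     for row in img_matrix:
--         cells = row[:width]
--         n = len(cells)
--         new_row = []
--         i = 0
--         while i < n:
--             j = i
--             while j < n and cells[j] != 0:
--                 j += 1
--             new_row += sorted(cells[i:j])
--             if j < n:
--                 new_row.append(0)
--                 j += 1
--             i = j
--         result.append(new_row)
--     return result
-- ===== Notes on version B (the rewrite author's own statement) =====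
-- stated objective: alternative
-- what changed: B splits each row (truncated to the first row's width) into zero-delimited runs with a two-pointer scan and sorts each run, replacing A's accumulate-and-flush buffer state machine over column indices.
import Mathlib
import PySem

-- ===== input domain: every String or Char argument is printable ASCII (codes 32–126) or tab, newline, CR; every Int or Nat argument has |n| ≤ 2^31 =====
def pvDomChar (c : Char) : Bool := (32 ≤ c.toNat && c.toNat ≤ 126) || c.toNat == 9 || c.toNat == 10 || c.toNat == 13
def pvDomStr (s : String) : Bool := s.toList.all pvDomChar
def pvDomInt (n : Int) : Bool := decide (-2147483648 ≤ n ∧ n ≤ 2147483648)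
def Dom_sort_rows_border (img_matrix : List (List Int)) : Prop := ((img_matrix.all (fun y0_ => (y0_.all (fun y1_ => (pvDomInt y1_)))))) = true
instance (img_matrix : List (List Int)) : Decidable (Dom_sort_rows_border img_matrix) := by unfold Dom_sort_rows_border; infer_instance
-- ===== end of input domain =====

-- B splits each row into zero-delimited runs (two-pointer scan) and sorts each run, instead of
-- A's accumulate-and-flush buffer; same return value on Pre_; where A raises IndexError
-- (a later row shorter than the first), B returns the truncated rows instead.

-- ===== PORT A =====
-- A's per-row inner loop: state (new_matrix[i] so far, sorted_list); j-loop over range(len(img_matrix[0]))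
def pvStepA (st : List Int × List Int) (x : Int) : List Int × List Int :=
  if x ≠ 0 then (st.1, st.2 ++ [x])
  else (st.1 ++ PySem.List.sorted st.2 (fun v => v) false ++ [0], [])

def sort_rows_border (img_matrix : List (List Int)) : List (List Int) :=
  let w : Int := ((img_matrix.headD []).length : Int)
  img_matrix.map (fun row =>
    let st := (PySem.List.pyRange 0 w 1).foldl
        (fun st j => pvStepA st (PySem.List.pyGetD row j 0)) ([], [])
    if st.2 ≠ [] then st.1 ++ PySem.List.sorted st.2 (fun v => v) false else st.1)

-- ===== PORT B =====
-- B's inner while-loops: takeWhile (≠ 0) is the run cells[i:j], dropWhile its delimiter + rest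
def pvRuns (cells : List Int) : List Int :=
  match h : cells.dropWhile (fun v => v != 0) with
  | [] => PySem.List.sorted (cells.takeWhile (fun v => v != 0)) (fun v => v) false
  | _ :: rest =>
      PySem.List.sorted (cells.takeWhile (fun v => v != 0)) (fun v => v) false ++ 0 :: pvRuns rest
  termination_by cells.length
  decreasing_by
    have hle := List.length_dropWhile_le (fun v => v != 0) cells
    rw [h] at hle; simp at hle; omega

def sort_rows_border_alt (img_matrix : List (List Int)) : List (List Int) :=
  let w : Nat := (img_matrix.headD []).length
  img_matrix.map (fun row => pvRuns (row.take w))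

-- ===== PRECONDITION & SPEC =====
-- A indexes every row at 0..len(first row)-1, so it raises IndexError when some row is shorter
-- than the first row; Pre_ excludes exactly those matrices.
def Pre_sort_rows_border (img_matrix : List (List Int)) : Prop :=
  ∀ row ∈ img_matrix, (img_matrix.headD []).length ≤ row.length
instance (img_matrix : List (List Int)) : Decidable (Pre_sort_rows_border img_matrix) := by
  unfold Pre_sort_rows_border; infer_instance

def pvWitness_sort_rows_border : List (List Int) := [[3, 1, 0, 2], [0, 5, 4, 0], [2, 2, 1, 9]]

def Spec_sort_rows_border (img_matrix : List (List Int)) (out : List (List Int)) : Prop := out = sort_rows_border_alt img_matrix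
instance (img_matrix : List (List Int)) (out : List (List Int)) : Decidable (Spec_sort_rows_border img_matrix out) := by unfold Spec_sort_rows_border; infer_instance

-- ===== CLAIM (what is proved, stated in full; the proofs are below) =====
def Claim_equal_sort_rows_border : Prop := ∀ (img_matrix : List (List Int)), Dom_sort_rows_border img_matrix → Pre_sort_rows_border img_matrix → Spec_sort_rows_border img_matrix (sort_rows_border img_matrix)

-- ===== LEMMAS AND PROOFS =====

lemma takeWhile_append_of_all (buf l : List Int) (h : ∀ x ∈ buf, (x != 0) = true) :
    (buf ++ l).takeWhile (fun v => v != 0) = buf ++ l.takeWhile (fun v => v != 0) := by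
  induction buf with
  | nil => simp
  | cons b bs ih =>
    have hb : (b != 0) = true := h b (by simp)
    simp only [List.cons_append, List.takeWhile_cons, hb, List.cons.injEq, true_and, if_true]
    exact ih (fun x hx => h x (by simp [hx]))

lemma dropWhile_append_of_all (buf l : List Int) (h : ∀ x ∈ buf, (x != 0) = true) :
    (buf ++ l).dropWhile (fun v => v != 0) = l.dropWhile (fun v => v != 0) := by
  induction buf with
  | nil => simp
  | cons b bs ih =>
    have hb : (b != 0) = true := h b (by simp)
    simp only [List.cons_append, List.dropWhile_cons, hb, if_true]
    exact ih (fun x hx => h x (by simp [hx]))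

lemma sorted_nil_id : PySem.List.sorted ([] : List Int) (fun v => v) false = [] := rfl

lemma pvRuns_drop_nil (cells : List Int) (h : cells.dropWhile (fun v => v != 0) = []) :
    pvRuns cells = PySem.List.sorted (cells.takeWhile (fun v => v != 0)) (fun v => v) false := by
  rw [pvRuns.eq_def]; split
  · rfl
  · rename_i z rest hz; rw [h] at hz; cases hz

lemma pvRuns_drop_cons (cells : List Int) (z : Int) (rest : List Int)
    (h : cells.dropWhile (fun v => v != 0) = z :: rest) :
    pvRuns cells = PySem.List.sorted (cells.takeWhile (fun v => v != 0)) (fun v => v) false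
      ++ 0 :: pvRuns rest := by
  rw [pvRuns.eq_def]; split
  · rename_i hz; rw [h] at hz; cases hz
  · rename_i z' rest' hz; rw [h] at hz; cases hz; rfl

-- A's flush-at-end equals appending sorted buffer unconditionally (sorted [] = [])
lemma finishA_eq (acc buf : List Int) :
    (if buf ≠ [] then acc ++ PySem.List.sorted buf (fun v => v) false else acc)
      = acc ++ PySem.List.sorted buf (fun v => v) false := by
  by_cases h : buf = []
  · subst h; rw [sorted_nil_id]; simp
  · simp [h]

-- the loop invariant: A's fold with a nonzero buffer computes acc ++ pvRuns (buf ++ cells)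
lemma loop_eq (cells : List Int) : ∀ acc buf, (∀ x ∈ buf, (x != 0) = true) →
    (let st := cells.foldl pvStepA (acc, buf)
     st.1 ++ PySem.List.sorted st.2 (fun v => v) false) = acc ++ pvRuns (buf ++ cells) := by
  induction cells with
  | nil =>
    intro acc buf h
    rw [List.append_nil,
      pvRuns_drop_nil buf (List.dropWhile_eq_nil_iff.mpr (fun x hx => h x hx)),
      List.takeWhile_eq_self_iff.mpr (fun x hx => h x hx)]
    simp [List.foldl]
  | cons x cells ih =>
    intro acc buf h
    by_cases hx : x = 0
    · subst hx
      simp only [List.foldl_cons, pvStepA, ne_eq, not_true_eq_false, if_false]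
      rw [ih (acc ++ PySem.List.sorted buf (fun v => v) false ++ [0]) [] (by simp)]
      have hdrop : (buf ++ 0 :: cells).dropWhile (fun v => v != 0) = 0 :: cells := by
        rw [dropWhile_append_of_all buf (0 :: cells) h]; simp [List.dropWhile]
      have htake : (buf ++ 0 :: cells).takeWhile (fun v => v != 0) = buf := by
        rw [takeWhile_append_of_all buf (0 :: cells) h]; simp [List.takeWhile]
      rw [pvRuns_drop_cons _ 0 cells hdrop, htake]
      simp [List.append_assoc]
    · have hxb : (x != 0) = true := by simp [hx]
      simp only [List.foldl_cons, pvStepA, ne_eq, hx, not_false_eq_true, if_true]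
      have hall : ∀ y ∈ buf ++ [x], (y != 0) = true := by
        intro y hy
        rcases List.mem_append.1 hy with h1 | h1
        · exact h y h1
        · simp at h1; simp [h1, hx]
      rw [ih acc (buf ++ [x]) hall, List.append_assoc]
      simp

-- the pyRange/pyGetD loop over the first w cells equals a fold over row.take w
lemma range_fold_eq (row : List Int) (w : Nat) (hw : w ≤ row.length) (init : List Int × List Int) :
    (PySem.List.pyRange 0 (w : Int) 1).foldl
        (fun st j => pvStepA st (PySem.List.pyGetD row j 0)) init
      = (row.take w).foldl pvStepA init := by
  have hlen : (row.take w).length = w := by simp [hw]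
  have hcongr : (PySem.List.pyRange 0 (w : Int) 1).foldl
        (fun st j => pvStepA st (PySem.List.pyGetD row j 0)) init
      = (PySem.List.pyRange 0 ((row.take w).length : Int) 1).foldl
        (fun st j => pvStepA st (PySem.List.pyGetD (row.take w) j 0)) init := by
    rw [hlen]
    refine PySem.List.foldl_congr_mem _ _ _ _ ?_
    intro st j hj
    have hj' := (PySem.List.mem_pyRange_one).1 hj
    rw [PySem.List.pyGetD_eq_getElem row 0 hj'.1 (by omega),
      PySem.List.pyGetD_eq_getElem (row.take w) 0 hj'.1 (by rw [hlen]; omega),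
      List.getElem_take]
  rw [hcongr]
  exact PySem.List.foldl_pyRange_zero_pyGetD' (row.take w) 0 pvStepA init

-- ===== VERDICT =====
theorem sort_rows_border_spec : Claim_equal_sort_rows_border := by
  intro img _ hpre
  unfold Spec_sort_rows_border sort_rows_border sort_rows_border_alt
  apply List.map_congr_left
  intro row hrow
  have hw := hpre row hrow
  rw [range_fold_eq row _ hw ([], [])]
  rw [finishA_eq]
  have := loop_eq (row.take (img.headD []).length) [] [] (by simp)
  simpa using this
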